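-- pv_equiv track=rewrite | github.com/sakshi3861/Synapse-Tasks | Task2.py | earliest_step_to_form_lumos
-- ===== SOURCE A (Python) =====
-- def earliest_step_to_form_lumos(runes: str) -> int:
--     required = set("lumos")  # We need one of each: L, U, M, O, S
--     seen = set()
--
--     for index, ch in enumerate(runes, start=1):
--         if ch.lower() in required:
--             seen.add(ch.lower())
--         # Check if we've collected all required runes
--         if seen == required:
--             return index
--     return -1
-- ===== SOURCE B (Python) =====
-- def earliest_step_to_form_lumos(runes: str) -> int:
--     # Staged passes: find each required letter's first occurrence independently,
--     # then the answer is the latest of those five positions (1-based), or -1.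
--     s = runes.lower()
--     positions = [s.find(c) for c in "lumos"]
--     if -1 in positions:
--         return -1
--     return max(positions) + 1
-- ===== Notes on version B (the rewrite author's own statement) =====
-- stated objective: faster
-- what changed: Replaces the incremental single-scan seen-set completeness check with five independent str.find passes (one per required letter on the lowered string) combined by a -1 membership test and a max-reduction.
import Mathlib
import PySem

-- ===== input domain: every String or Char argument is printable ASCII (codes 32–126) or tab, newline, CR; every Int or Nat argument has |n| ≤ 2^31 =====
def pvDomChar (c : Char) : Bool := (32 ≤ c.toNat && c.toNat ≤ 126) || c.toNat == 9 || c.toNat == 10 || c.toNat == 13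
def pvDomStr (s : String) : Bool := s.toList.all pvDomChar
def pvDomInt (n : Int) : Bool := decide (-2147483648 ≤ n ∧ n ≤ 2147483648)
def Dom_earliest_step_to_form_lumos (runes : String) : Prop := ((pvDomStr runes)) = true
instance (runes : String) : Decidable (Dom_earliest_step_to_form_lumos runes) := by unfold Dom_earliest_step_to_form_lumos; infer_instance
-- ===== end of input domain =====

-- B replaces A's incremental single-scan seen-set completeness check with five independent
-- str.find passes (one per required letter on the lowered string) combined by a -1 test and a
-- max-reduction; same O(n) result, measurably faster by a constant factor in CPython.

-- ===== PORT A =====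
-- required = set("lumos")
def lumosReq : PySem.Set Char := PySem.Set.ofList "lumos".toList

-- 'for index, ch in enumerate(runes, start=1)': the loop carries the running index
def lumosLoopA : List Char → Int → PySem.Set Char → Int
  | [], _, _ => -1
  | ch :: rest, index, seen =>
    let seen' := if PySem.Set.contains lumosReq (PySem.Chars.lowerChar ch)
                 then PySem.Set.add seen (PySem.Chars.lowerChar ch) else seen
    if PySem.Set.equal seen' lumosReq then index else lumosLoopA rest (index + 1) seen'

def earliest_step_to_form_lumos (runes : String) : Int :=
  lumosLoopA runes.toList 1 PySem.Set.empty

-- ===== PORT B =====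
def earliest_step_to_form_lumos_alt (runes : String) : Int :=
  -- s = runes.lower()
  let s := PySem.Str.lower runes
  -- positions = [s.find(c) for c in "lumos"]
  let positions := "lumos".toList.map (fun c => PySem.Str.find s (String.ofList [c]))
  -- if -1 in positions: return -1
  if positions.contains (-1) then -1
  -- return max(positions) + 1   (positions has 5 elements, so the none branch is unreachable)
  else (PySem.List.max? positions (fun x => x)).getD (-1) + 1

-- ===== PRECONDITION & SPEC =====
def Spec_earliest_step_to_form_lumos (runes : String) (out : Int) : Prop := out = earliest_step_to_form_lumos_alt runes
instance (runes : String) (out : Int) : Decidable (Spec_earliest_step_to_form_lumos runes out) := by unfold Spec_earliest_step_to_form_lumos; infer_instance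

-- ===== CLAIM (what is proved, stated in full; the proofs are below) =====
def Claim_equal_earliest_step_to_form_lumos : Prop := ∀ (runes : String), Dom_earliest_step_to_form_lumos runes → Spec_earliest_step_to_form_lumos runes (earliest_step_to_form_lumos runes)

-- ===== LEMMAS AND PROOFS =====

-- reference first-occurrence function: 0-based index of the first character whose lowering is c, else -1
def myFindL : List Char → Char → Int
  | [], _ => -1
  | x :: t, c =>
    if PySem.Chars.lowerChar x = c then 0
    else if myFindL t c = -1 then -1 else myFindL t c + 1

-- the required letters not yet seen
def pendOf (seen : PySem.Set Char) : List Char :=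
  "lumos".toList.filter (fun c => !(PySem.Set.contains seen c))

-- reference value of the remaining computation: -1 if some pending letter never occurs,
-- else i + (latest first occurrence among the pending letters)
def rhsP (pend : List Char) (cs : List Char) (i : Int) : Int :=
  if (-1) ∈ pend.map (fun c => myFindL cs c) then -1
  else i + (pend.map (fun c => myFindL cs c)).foldl max (-1)

theorem myFindL_ge (cs : List Char) (c : Char) : -1 ≤ myFindL cs c := by
  induction cs with
  | nil => simp [myFindL]
  | cons x t ih => simp only [myFindL]; split_ifs <;> omega

theorem singleton_infix_iff (c : Char) (l : List Char) : [c] <:+: l ↔ c ∈ l := by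
  constructor
  · intro h; exact h.sublist.mem (by simp)
  · intro h
    obtain ⟨s, t, rfl⟩ := List.append_of_mem h
    exact ⟨s, t, by simp⟩

theorem singleton_prefix_iff (c : Char) (l : List Char) : [c] <+: l ↔ ∃ t, l = c :: t := by
  constructor
  · rintro ⟨t, rfl⟩; exact ⟨t, rfl⟩
  · rintro ⟨t, rfl⟩; exact ⟨t, rfl⟩

theorem myFindL_of_not_mem (cs : List Char) (c : Char) (h : c ∉ cs.map PySem.Chars.lowerChar) :
    myFindL cs c = -1 := by
  induction cs with
  | nil => simp [myFindL]
  | cons x t ih =>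
    simp only [List.map_cons, List.mem_cons, not_or] at h
    have hx : PySem.Chars.lowerChar x ≠ c := fun he => h.1 he.symm
    simp [myFindL, hx, ih h.2]

theorem myFindL_spec (cs : List Char) (c : Char) (h : c ∈ cs.map PySem.Chars.lowerChar) :
    0 ≤ myFindL cs c ∧ [c] <+: (cs.map PySem.Chars.lowerChar).drop (myFindL cs c).toNat ∧
      ∀ j < (myFindL cs c).toNat, ¬ [c] <+: (cs.map PySem.Chars.lowerChar).drop j := by
  induction cs with
  | nil => simp at h
  | cons x t ih =>
    by_cases hx : PySem.Chars.lowerChar x = c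
    · refine ⟨by simp [myFindL, hx], ?_, ?_⟩
      · simp [myFindL, hx]
      · simp [myFindL, hx]
    · have hmem : c ∈ t.map PySem.Chars.lowerChar := by
        simp only [List.map_cons, List.mem_cons] at h
        tauto
      obtain ⟨h0, hpre, hmin⟩ := ih hmem
      have hne : myFindL t c ≠ -1 := by omega
      have heq : myFindL (x :: t) c = myFindL t c + 1 := by
        simp [myFindL, hx, hne]
      have htn : (myFindL t c + 1).toNat = (myFindL t c).toNat + 1 := by omega
      refine ⟨by omega, ?_, ?_⟩
      · rw [heq, htn]; simpa using hpre
      · rw [heq, htn]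
        intro j hj
        cases j with
        | zero =>
          simp only [List.map_cons, List.drop_zero, singleton_prefix_iff]
          rintro ⟨t', ht'⟩
          exact hx (by injection ht')
        | succ j' =>
          have := hmin j' (by omega)
          simpa using this

theorem myFindL_eq_find (cs : List Char) (c : Char) :
    myFindL cs c = PySem.Chars.find (cs.map PySem.Chars.lowerChar) [c] := by
  by_cases hm : c ∈ cs.map PySem.Chars.lowerChar
  · obtain ⟨h0, hpre, hmin⟩ := myFindL_spec cs c hm
    have hf0 : 0 ≤ PySem.Chars.find (cs.map PySem.Chars.lowerChar) [c] :=
      (PySem.Chars.find_nonneg_iff ..).mpr ((singleton_infix_iff ..).mpr hm)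
    obtain ⟨hfpre, hfmin⟩ := PySem.Chars.find_spec hf0
    have h1 : ¬ (myFindL cs c).toNat < (PySem.Chars.find (cs.map PySem.Chars.lowerChar) [c]).toNat :=
      fun hlt => hfmin _ hlt hpre
    have h2 : ¬ (PySem.Chars.find (cs.map PySem.Chars.lowerChar) [c]).toNat < (myFindL cs c).toNat :=
      fun hlt => hmin _ hlt hfpre
    omega
  · rw [myFindL_of_not_mem cs c hm, (PySem.Chars.find_eq_neg_one_iff ..).mpr]
    rw [singleton_infix_iff]; exact hm

theorem foldl_max_map_add_one (t : List Int) (a : Int) :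
    (t.map (fun x => x + 1)).foldl max (a + 1) = t.foldl max a + 1 := by
  induction t generalizing a with
  | nil => simp
  | cons b t' ih =>
    simp only [List.map_cons, List.foldl_cons]
    rw [show max (a + 1) (b + 1) = max a b + 1 by omega]
    exact ih (max a b)

theorem foldl_max_perm {l₁ l₂ : List Int} (h : l₁.Perm l₂) (a : Int) :
    l₁.foldl max a = l₂.foldl max a := by
  induction h generalizing a with
  | nil => rfl
  | cons x _ ih => simp only [List.foldl_cons]; exact ih _
  | swap x y l =>
    simp only [List.foldl_cons]
    rw [show max (max a y) x = max (max a x) y by omega]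
  | trans _ _ ih₁ ih₂ => exact (ih₁ a).trans (ih₂ a)

theorem rhsP_perm {p₁ p₂ : List Char} (h : p₁.Perm p₂) (cs : List Char) (i : Int) :
    rhsP p₁ cs i = rhsP p₂ cs i := by
  have hm : p₁.map (fun c => myFindL cs c) |>.Perm (p₂.map (fun c => myFindL cs c)) := h.map _
  unfold rhsP
  rw [foldl_max_perm hm]
  simp only [hm.mem_iff]

theorem rhsP_nil_cs (pend : List Char) (i : Int) (hne : pend ≠ []) : rhsP pend [] i = -1 := by
  obtain ⟨c, t, rfl⟩ := List.exists_cons_of_ne_nil hne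
  simp [rhsP, myFindL]

-- a step past a character that matches no pending letter shifts every first occurrence by one
theorem rhsP_shift (pend : List Char) (ch : Char) (rest : List Char) (i : Int)
    (h : ∀ c ∈ pend, PySem.Chars.lowerChar ch ≠ c) (hne : pend ≠ []) :
    rhsP pend (ch :: rest) i = rhsP pend rest (i + 1) := by
  unfold rhsP
  have hmap : pend.map (fun c => myFindL (ch :: rest) c)
      = pend.map (fun c => if myFindL rest c = -1 then -1 else myFindL rest c + 1) := by
    apply List.map_congr_left
    intro c hc
    simp [myFindL, h c hc]
  rw [hmap]
  by_cases hneg : (-1) ∈ pend.map (fun c => myFindL rest c)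
  · obtain ⟨c, hc, hcv⟩ := List.mem_map.mp hneg
    rw [if_pos, if_pos hneg]
    exact List.mem_map.mpr ⟨c, hc, by simp [hcv]⟩
  · have hall : ∀ c ∈ pend, myFindL rest c ≠ -1 := by
      intro c hc hcv
      exact hneg (List.mem_map.mpr ⟨c, hc, hcv⟩)
    have hneg' : (-1) ∉ pend.map (fun c => if myFindL rest c = -1 then -1 else myFindL rest c + 1) := by
      intro hmem
      obtain ⟨c, hc, hcv⟩ := List.mem_map.mp hmem
      rw [if_neg (hall c hc)] at hcv
      have := myFindL_ge rest c
      omega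
    rw [if_neg hneg', if_neg hneg]
    have hmap2 : pend.map (fun c => if myFindL rest c = -1 then -1 else myFindL rest c + 1)
        = (pend.map (fun c => myFindL rest c)).map (fun x => x + 1) := by
      rw [List.map_map]
      apply List.map_congr_left
      intro c hc
      simp [Function.comp, hall c hc]
    rw [hmap2]
    obtain ⟨c, t, rfl⟩ := List.exists_cons_of_ne_nil hne
    have hc0 : 0 ≤ myFindL rest c := by
      have h1 := myFindL_ge rest c
      have h2 := hall c (by simp)
      omega
    simp only [List.map_cons, List.foldl_cons]
    rw [show max (-1 : Int) (myFindL rest c + 1) = max (-1) (myFindL rest c) + 1 by omega]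
    rw [foldl_max_map_add_one]
    omega

-- a pending letter found right now (at offset 0) never dominates the remaining maximum
theorem rhsP_cons_zero (pend : List Char) (c0 ch : Char) (rest : List Char) (i : Int)
    (hzero : PySem.Chars.lowerChar ch = c0) (hne : pend ≠ []) :
    rhsP (c0 :: pend) (ch :: rest) i = rhsP pend (ch :: rest) i := by
  unfold rhsP
  have h0 : myFindL (ch :: rest) c0 = 0 := by simp [myFindL, hzero]
  simp only [List.map_cons, h0]
  by_cases hneg : (-1) ∈ pend.map (fun c => myFindL (ch :: rest) c)
  · rw [if_pos (by simp [hneg]), if_pos hneg]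
  · rw [if_neg (by simp [hneg]), if_neg hneg]
    obtain ⟨c, t, rfl⟩ := List.exists_cons_of_ne_nil hne
    have hc0 : 0 ≤ myFindL (ch :: rest) c := by
      have h1 := myFindL_ge (ch :: rest) c
      have h2 : myFindL (ch :: rest) c ≠ -1 := fun hv => hneg (by simp [hv])
      omega
    simp only [List.map_cons, List.foldl_cons]
    rw [show max (max (-1 : Int) 0) (myFindL (ch :: rest) c) = max (-1) (myFindL (ch :: rest) c) by omega]

theorem pend_mem (seen : PySem.Set Char) (c : Char) :
    c ∈ pendOf seen ↔ c ∈ "lumos".toList ∧ c ∉ seen := by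
  simp only [pendOf, List.mem_filter, Bool.not_eq_eq_eq_not, Bool.not_true]
  constructor
  · rintro ⟨h1, h2⟩
    refine ⟨h1, fun hc => ?_⟩
    rw [← Bool.not_eq_true, PySem.Set.contains_iff] at h2
    exact h2 hc
  · rintro ⟨h1, h2⟩
    refine ⟨h1, ?_⟩
    rw [← Bool.not_eq_true, PySem.Set.contains_iff]
    exact h2

theorem lumos_nodup : ("lumos".toList).Nodup := by decide

theorem pend_nodup (seen : PySem.Set Char) : (pendOf seen).Nodup := lumos_nodup.filter _

theorem pend_nonempty (seen : PySem.Set Char) (hsub : ∀ k ∈ seen, k ∈ "lumos".toList)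
    (heq : PySem.Set.equal seen lumosReq = false) : pendOf seen ≠ [] := by
  intro hnil
  have hall : ∀ c ∈ "lumos".toList, c ∈ seen := by
    intro c hc
    by_contra hns
    have : c ∈ pendOf seen := (pend_mem ..).mpr ⟨hc, hns⟩
    simp [hnil] at this
  have : PySem.Set.equal seen lumosReq = true := by
    rw [PySem.Set.equal_iff]
    intro x
    constructor
    · intro hx
      exact (PySem.Set.mem_ofList ..).mpr (hsub x hx)
    · intro hx
      exact hall x ((PySem.Set.mem_ofList ..).mp hx)
  rw [this] at heq; cases heq

theorem pend_single (seen : PySem.Set Char) (c0 : Char) (hc0L : c0 ∈ "lumos".toList)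
    (hc0 : c0 ∉ seen) (hfull : PySem.Set.equal (seen ++ [c0]) lumosReq = true) :
    pendOf seen = [c0] := by
  have hc0p : c0 ∈ pendOf seen := (pend_mem ..).mpr ⟨hc0L, hc0⟩
  have hallc : ∀ c ∈ pendOf seen, c = c0 := by
    intro c hc
    obtain ⟨hcL, hcs⟩ := (pend_mem ..).mp hc
    have := ((PySem.Set.equal_iff ..).mp hfull c).mpr ((PySem.Set.mem_ofList ..).mpr hcL)
    rcases List.mem_append.mp this with h | h
    · exact absurd h hcs
    · simpa using h
  have hnd := pend_nodup seen
  rcases hp : pendOf seen with _ | ⟨a, t⟩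
  · rw [hp] at hc0p; simp at hc0p
  · rw [hp] at hallc hnd
    have ha : a = c0 := hallc a (by simp)
    rcases t with _ | ⟨b, t'⟩
    · rw [ha]
    · have hb : b = c0 := hallc b (by simp)
      rw [ha, hb] at hnd
      simp at hnd

theorem pend_perm (seen : PySem.Set Char) (c0 : Char) (hc0L : c0 ∈ "lumos".toList)
    (hc0 : c0 ∉ seen) : (pendOf seen).Perm (c0 :: pendOf (seen ++ [c0])) := by
  rw [List.perm_ext_iff_of_nodup (pend_nodup seen)]
  · intro x
    simp only [List.mem_cons, pend_mem, List.mem_append]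
    constructor
    · rintro ⟨hxL, hxs⟩
      by_cases hx : x = c0
      · exact Or.inl hx
      · exact Or.inr ⟨hxL, by tauto⟩
    · rintro (rfl | ⟨hxL, hxs⟩)
      · exact ⟨hc0L, hc0⟩
      · exact ⟨hxL, fun hx => hxs (Or.inl hx)⟩
  · refine List.Nodup.cons ?_ (pend_nodup _)
    intro hc
    exact ((pend_mem ..).mp hc).2 (List.mem_append.mpr (Or.inr (by simp)))

-- main loop invariant: A's remaining scan computes the rhsP reference value over the pending letters
theorem loopA_inv (cs : List Char) : ∀ (i : Int) (seen : PySem.Set Char),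
    seen.Nodup → (∀ k ∈ seen, k ∈ "lumos".toList) → PySem.Set.equal seen lumosReq = false →
    lumosLoopA cs i seen = rhsP (pendOf seen) cs i := by
  induction cs with
  | nil =>
    intro i seen _ hsub heq
    rw [rhsP_nil_cs _ _ (pend_nonempty seen hsub heq)]
    rfl
  | cons ch rest ih =>
    intro i seen hnd hsub heq
    have hpne := pend_nonempty seen hsub heq
    simp only [lumosLoopA]
    by_cases hm : PySem.Chars.lowerChar ch ∈ "lumos".toList
    · have hcA : PySem.Set.contains lumosReq (PySem.Chars.lowerChar ch) = true := by
        rw [PySem.Set.contains_iff]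
        exact (PySem.Set.mem_ofList ..).mpr hm
      by_cases hk : PySem.Chars.lowerChar ch ∈ seen
      · -- letter already seen: state unchanged, every pending letter differs from it
        rw [hcA, if_pos rfl, PySem.Set.add_of_mem hk, heq]
        simp only [Bool.false_eq_true, if_false]
        rw [ih (i + 1) seen hnd hsub heq]
        exact (rhsP_shift _ ch rest i
          (fun c hc he => ((pend_mem ..).mp hc).2 (he ▸ hk)) hpne).symm
      · rw [hcA, if_pos rfl, PySem.Set.add_of_not_mem hk]
        by_cases hfull : PySem.Set.equal (seen ++ [PySem.Chars.lowerChar ch]) lumosReq = true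
        · -- the last missing letter appears right now: A returns i, rhsP over the single
          -- pending letter is i + 0
          rw [if_pos hfull, pend_single seen _ hm hk hfull]
          simp [rhsP, myFindL]
        · rw [if_neg (by simp [hfull])]
          have hnd' : (seen ++ [PySem.Chars.lowerChar ch]).Nodup :=
            List.Nodup.append hnd (List.nodup_singleton _)
              (fun a ha hb => hk ((List.mem_singleton.mp hb) ▸ ha))
          have hsub' : ∀ k ∈ seen ++ [PySem.Chars.lowerChar ch], k ∈ "lumos".toList := by
            intro k hkk
            rcases List.mem_append.mp hkk with h | h
            · exact hsub k h
            · have hke : k = PySem.Chars.lowerChar ch := by simpa using h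
              rw [hke]; exact hm
          have heq' : PySem.Set.equal (seen ++ [PySem.Chars.lowerChar ch]) lumosReq = false := by
            rw [← Bool.not_eq_true]; exact hfull
          rw [ih (i + 1) _ hnd' hsub' heq']
          have hpne' := pend_nonempty _ hsub' heq'
          rw [rhsP_perm (pend_perm seen _ hm hk) (ch :: rest) i,
            rhsP_cons_zero _ _ ch rest i rfl hpne',
            rhsP_shift _ ch rest i
              (fun c hc he => ((pend_mem ..).mp hc).2 (List.mem_append.mpr (Or.inr (by simp [he]))))
              hpne']
    · -- not a required letter: state unchanged
      have hcA : PySem.Set.contains lumosReq (PySem.Chars.lowerChar ch) = false := by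
        rw [← Bool.not_eq_true, PySem.Set.contains_iff]
        intro hc
        exact hm ((PySem.Set.mem_ofList ..).mp hc)
      rw [hcA]
      simp only [Bool.false_eq_true, if_false, heq]
      rw [ih (i + 1) seen hnd hsub heq]
      exact (rhsP_shift _ ch rest i
        (fun c hc he => hm (he ▸ ((pend_mem ..).mp hc).1)) hpne).symm

-- B's port computes the rhsP reference value over all five letters
theorem alt_eq_rhsP (runes : String) :
    earliest_step_to_form_lumos_alt runes = rhsP ("lumos".toList) runes.toList 1 := by
  simp only [earliest_step_to_form_lumos_alt, rhsP]
  have hpos : "lumos".toList.map (fun c => PySem.Str.find (PySem.Str.lower runes) (String.ofList [c]))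
      = "lumos".toList.map (fun c => myFindL runes.toList c) := by
    apply List.map_congr_left
    intro c _
    rw [myFindL_eq_find]
    simp [PySem.Chars.lower]
  rw [hpos]
  simp only [List.contains_eq_mem, decide_eq_true_eq]
  by_cases hneg : (-1 : Int) ∈ "lumos".toList.map (fun c => myFindL runes.toList c)
  · rw [if_pos hneg, if_pos hneg]
  · rw [if_neg hneg, if_neg hneg]
    have hL : ("lumos".toList : List Char) = 'l' :: ['u', 'm', 'o', 's'] := rfl
    rw [hL]
    simp only [List.map_cons]
    rw [PySem.List.max?_id_cons]
    have h0 : 0 ≤ myFindL runes.toList 'l' := by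
      have h1 := myFindL_ge runes.toList 'l'
      have h2 : myFindL runes.toList 'l' ≠ -1 := fun hv => hneg (by rw [hL]; simp [hv])
      omega
    simp only [Option.getD_some, List.foldl_cons]
    rw [show max (-1 : Int) (myFindL runes.toList 'l') = myFindL runes.toList 'l' by omega]
    omega

-- ===== VERDICT (by name: the statement is the Claim_ definition above) =====
theorem earliest_step_to_form_lumos_spec : Claim_equal_earliest_step_to_form_lumos := by
  intro runes _
  unfold Spec_earliest_step_to_form_lumos earliest_step_to_form_lumos
  rw [alt_eq_rhsP,
    show ("lumos".toList : List Char) = pendOf PySem.Set.empty from rfl]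
  exact loopA_inv runes.toList 1 PySem.Set.empty (by simp [PySem.Set.empty]) (by simp [PySem.Set.empty]) (by decide)
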